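-- pv_equiv track=rewrite | github.com/habvi/kyopro_educational90 | level_5/006_SmallestSubsequence.py | right_leftmost_idx
-- ===== SOURCE A (Python) =====
-- def stoi(s):
--     return ord(s) - ord('a')
--
-- def right_leftmost_idx(S):
--     n = len(S)
--     idx = [[n] * 26 for _ in range(n + 1)]
--     for i in reversed(range(n)):
--         for alph in range(26):
--             if stoi(S[i]) == alph:
--                 idx[i][alph] = i
--             else:
--                 idx[i][alph] = idx[i + 1][alph]
--     return idx
-- ===== SOURCE B (Python) =====
-- def right_leftmost_idx(S):
--     n = len(S)
--     cols = []
--     for c in range(26):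
--         ch = chr(97 + c)
--         col = []
--         prev = 0
--         for p, x in enumerate(S):
--             if x == ch:
--                 col.extend([p] * (p - prev + 1))
--                 prev = p + 1
--         col.extend([n] * (n + 1 - prev))
--         cols.append(col)
--     return [list(row) for row in zip(*cols)]
-- ===== Notes on version B (the rewrite author's own statement) =====
-- stated objective: faster
-- what changed: B builds the table column-wise: one forward pass per letter block-filling the column between consecutive occurrences of that letter (list.extend of constant blocks), then a transpose via zip(*cols), instead of A's backward row-by-row DP recurrence with 26 per-cell Python writes per row.
import Mathlib
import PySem

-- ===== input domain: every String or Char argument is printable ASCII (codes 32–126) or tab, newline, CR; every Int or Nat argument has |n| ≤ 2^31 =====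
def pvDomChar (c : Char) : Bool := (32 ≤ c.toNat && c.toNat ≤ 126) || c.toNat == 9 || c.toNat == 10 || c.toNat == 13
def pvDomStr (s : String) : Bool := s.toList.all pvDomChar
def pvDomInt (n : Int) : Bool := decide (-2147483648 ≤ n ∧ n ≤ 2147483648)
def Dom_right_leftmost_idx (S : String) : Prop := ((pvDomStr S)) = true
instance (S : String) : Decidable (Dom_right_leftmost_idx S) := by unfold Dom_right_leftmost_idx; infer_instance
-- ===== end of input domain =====

-- B builds the table column-wise (one forward pass per letter, block-filling between
-- occurrences, then a transpose) instead of A's backward row-by-row recurrence.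

-- ===== PORT A =====
-- helper stoi(s) = ord(s) - ord('a')
def stoi (c : Char) : Int := (c.toNat : Int) - 97

-- literal port of A: idx = [[n]*26 for _ in range(n+1)]; for i in reversed(range(n)):
--   for alph in range(26): idx[i][alph] = i if stoi(S[i]) == alph else idx[i+1][alph]
def right_leftmost_idx (S : String) : List (List Int) :=
  let cs := S.toList
  let n := cs.length
  let idx0 := List.replicate (n + 1) (List.replicate 26 (n : Int))
  (List.range n).reverse.foldl (fun idx i =>
    (List.range 26).foldl (fun idx alph =>
      idx.set i ((idx[i]!).set alph
        (if stoi cs[i]! = (alph : Int) then (i : Int) else (idx[i+1]!)[alph]!))) idx) idx0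

-- ===== PORT B =====
-- literal port of B: for c in range(26): ch = chr(97+c); col = []; prev = 0;
--   for p, x in enumerate(S):
--     if x == ch: col.extend([p]*(p-prev+1)); prev = p+1
--   col.extend([n]*(n+1-prev)); cols.append(col)
-- return [list(row) for row in zip(*cols)]
-- (zip(*cols) is ported as the index-wise transpose; exact since every column has length n+1)
def right_leftmost_idx_alt (S : String) : List (List Int) :=
  let cs := S.toList
  let n := cs.length
  let cols := (List.range 26).map (fun c =>
    let ch := Char.ofNat (97 + c)
    let st := cs.zipIdx.foldl (fun (st : List Int × Nat) px =>
        if px.1 = ch then (st.1 ++ List.replicate (px.2 - st.2 + 1) ((px.2 : Int)), px.2 + 1)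
        else st) (([] : List Int), 0)
    st.1 ++ List.replicate (n + 1 - st.2) (n : Int))
  (List.range (n + 1)).map (fun i => cols.map (fun col => col[i]!))

-- ===== PRECONDITION & SPEC =====
def Spec_right_leftmost_idx (S : String) (out : List (List Int)) : Prop := out = right_leftmost_idx_alt S
instance (S : String) (out : List (List Int)) : Decidable (Spec_right_leftmost_idx S out) := by unfold Spec_right_leftmost_idx; infer_instance

-- ===== CLAIM (what is proved, stated in full; the proofs are below) =====
def Claim_equal_right_leftmost_idx : Prop := ∀ (S : String), Dom_right_leftmost_idx S → Spec_right_leftmost_idx S (right_leftmost_idx S)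

-- ===== LEMMAS AND PROOFS =====

-- reference: nxt ch l i = index of the first occurrence of ch in l (which starts at index i), else i + l.length
def nxt (ch : Char) : List Char → Nat → Nat
  | [], i => i
  | a :: l, i => if a = ch then i else nxt ch l (i+1)

-- reference entry (i, ch) of the table
def entryI (cs : List Char) (ch : Char) (i : Nat) : Int := (nxt ch (cs.drop i) i : Nat)

-- reference row i of the table
def refRow (cs : List Char) (i : Nat) : List Int :=
  (List.range 26).map (fun c => entryI cs (Char.ofNat (97 + c)) i)

theorem charEq (a : Char) (c : Nat) (hc : c < 26) : (a = Char.ofNat (97 + c)) ↔ a.toNat = 97 + c := by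
  have hv : (97 + c).isValidChar := Or.inl (by omega)
  constructor
  · rintro rfl
    rw [Char.toNat_ofNat, if_pos hv]
  · intro h
    rw [← Char.ofNat_toNat a, h]

theorem nxt_drop (cs : List Char) (ch : Char) (i : Nat) (h : i < cs.length) :
    nxt ch (cs.drop i) i = if cs[i]! = ch then i else nxt ch (cs.drop (i+1)) (i+1) := by
  rw [List.drop_eq_getElem_cons h, List.getElem!_eq_getElem?_getD, List.getElem?_eq_getElem h]
  rfl

theorem nxt_none (cs : List Char) (ch : Char) :
    ∀ k i, i + k = cs.length → (∀ t, i ≤ t → t < cs.length → cs[t]! ≠ ch) →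
      nxt ch (cs.drop i) i = cs.length := by
  intro k
  induction k with
  | zero =>
    intro i hi _
    rw [show i = cs.length by omega, List.drop_length]
    rfl
  | succ k ih =>
    intro i hi hno
    rw [nxt_drop cs ch i (by omega), if_neg (hno i le_rfl (by omega))]
    exact ih (i+1) (by omega) (fun t ht1 ht2 => hno t (by omega) ht2)

theorem nxt_hit (cs : List Char) (ch : Char) :
    ∀ k i j, i + k = j → j < cs.length → (∀ t, i ≤ t → t < j → cs[t]! ≠ ch) → cs[j]! = ch →
      nxt ch (cs.drop i) i = j := by
  intro k
  induction k with
  | zero =>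
    intro i j hij hj _ hch
    rw [show i = j by omega, nxt_drop cs ch j hj, if_pos hch]
  | succ k ih =>
    intro i j hij hj hno hch
    rw [nxt_drop cs ch i (by omega), if_neg (hno i le_rfl (by omega))]
    exact ih (i+1) j (by omega) hj (fun t ht1 ht2 => hno t (by omega) ht2) hch

-- map of entries over a block of indices with no occurrence / ending in an occurrence is constant
theorem map_entry_const (f : Nat → Int) (a len : Nat) (v : Int)
    (h : ∀ i, a ≤ i → i < a + len → f i = v) :
    (List.range' a len).map f = List.replicate len v := by
  rw [List.map_congr_left (g := fun _ => v) (fun i hi => by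
    rw [List.mem_range'] at hi
    obtain ⟨t, ht1, ht2⟩ := hi
    exact h i (by omega) (by omega)), List.map_const', List.length_range']

theorem range_split (a m : Nat) (h : a ≤ m) :
    List.range m = List.range a ++ List.range' a (m - a) := by
  rw [List.range_eq_range', List.range_eq_range', show m = a + (m - a) by omega,
    ← List.range'_append]
  simp

-- ===== B-side: the per-letter forward block-filling fold builds the reference column =====
theorem bfold (cs : List Char) (ch : Char) :
    ∀ k j, j + k = cs.length → ∀ prev, prev ≤ j →
      (∀ t, prev ≤ t → t < j → cs[t]! ≠ ch) →
      (((cs.drop j).zipIdx j).foldl (fun (st : List Int × Nat) px =>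
          if px.1 = ch then (st.1 ++ List.replicate (px.2 - st.2 + 1) ((px.2 : Int)), px.2 + 1)
          else st) ((List.range prev).map (entryI cs ch), prev)).1
        ++ List.replicate (cs.length + 1 -
            (((cs.drop j).zipIdx j).foldl (fun (st : List Int × Nat) px =>
              if px.1 = ch then (st.1 ++ List.replicate (px.2 - st.2 + 1) ((px.2 : Int)), px.2 + 1)
              else st) ((List.range prev).map (entryI cs ch), prev)).2) (cs.length : Int)
      = (List.range (cs.length + 1)).map (entryI cs ch) := by
  intro k
  induction k with
  | zero =>
    intro j hj prev hprev hno
    rw [show j = cs.length by omega, List.drop_length]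
    simp only [List.zipIdx_nil, List.foldl_nil]
    have hsplit : List.range (cs.length + 1) =
        List.range prev ++ List.range' prev (cs.length + 1 - prev) := by
      have := range_split prev (cs.length + 1) (by omega)
      rwa [show cs.length + 1 - prev = cs.length + 1 - prev from rfl] at this
    have hrep : (List.range' prev (cs.length + 1 - prev)).map (entryI cs ch)
        = List.replicate (cs.length + 1 - prev) (cs.length : Int) := by
      apply map_entry_const
      intro i hi1 hi2
      unfold entryI
      by_cases hin : i < cs.length
      · rw [nxt_none cs ch (cs.length - i) i (by omega)
          (fun t ht1 ht2 => hno t (by omega) (by omega))]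
      · rw [show i = cs.length by omega, List.drop_length]
        rfl
    rw [hsplit, List.map_append, hrep]
  | succ k ih =>
    intro j hj prev hprev hno
    have hjlt : j < cs.length := by omega
    have hdrop : cs.drop j = cs[j]! :: cs.drop (j+1) := by
      rw [List.drop_eq_getElem_cons hjlt]
      simp [List.getElem!_eq_getElem?_getD, List.getElem?_eq_getElem hjlt]
    rw [hdrop, List.zipIdx_cons, List.foldl_cons]
    by_cases hch : cs[j]! = ch
    · simp only [hch]
      have hblk : (List.range prev).map (entryI cs ch) ++ List.replicate (j - prev + 1) ((j : Int))
          = (List.range (j + 1)).map (entryI cs ch) := by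
        have hsplit : List.range (j + 1) = List.range prev ++ List.range' prev (j + 1 - prev) :=
          range_split prev (j + 1) (by omega)
        have hrep : (List.range' prev (j + 1 - prev)).map (entryI cs ch)
            = List.replicate (j + 1 - prev) ((j : Int)) := by
          apply map_entry_const
          intro i hi1 hi2
          unfold entryI
          rw [nxt_hit cs ch (j - i) i j (by omega) hjlt
            (fun t ht1 ht2 => hno t (by omega) ht2) hch]
        rw [hsplit, List.map_append, hrep, show j + 1 - prev = j - prev + 1 by omega]
      rw [hblk]
      exact ih (j+1) (by omega) (j+1) le_rfl (fun t ht1 ht2 => absurd ht2 (by omega))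
    · simp only [if_neg hch]
      exact ih (j+1) (by omega) prev (by omega)
        (fun t ht1 ht2 => by
          by_cases htj : t = j
          · subst htj; exact hch
          · exact hno t ht1 (by omega))

-- ===== A-side machinery (characterises A's fold as the backward row recursion tblRows) =====
def rowP (c : Int) (i : Int) (below : List Int) : List Int :=
  if 0 ≤ c ∧ c < 26 then below.set c.toNat i else below

def tblRows (cs : List Char) (n : Nat) : Nat → List (List Int)
  | 0 => [List.replicate 26 (n : Int)]
  | k+1 => rowP (stoi cs[n-(k+1)]!) ((n-(k+1) : Nat) : Int) (tblRows cs n k).head! :: tblRows cs n k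

theorem tblRows_ne_nil (cs : List Char) (n k : Nat) : tblRows cs n k ≠ [] := by
  cases k <;> simp [tblRows]

theorem rowP_length (c i : Int) (l : List Int) : (rowP c i l).length = l.length := by
  unfold rowP; split <;> simp

theorem tblRows_rows_len (cs : List Char) (n k : Nat) :
    ∀ r ∈ tblRows cs n k, r.length = 26 := by
  induction k with
  | zero => simp [tblRows]
  | succ k ih =>
    intro r hr
    simp only [tblRows, List.mem_cons] at hr
    rcases hr with h | h
    · subst h
      rw [rowP_length]
      have := tblRows_ne_nil cs n k
      have hh : (tblRows cs n k).head! ∈ tblRows cs n k := List.head!_mem_self this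
      exact ih _ hh
    · exact ih _ h

theorem tblRows_length (cs : List Char) (n k : Nat) : (tblRows cs n k).length = k + 1 := by
  induction k with
  | zero => simp [tblRows]
  | succ k ih => simp [tblRows, ih]

theorem foldl_set_length (m : Nat) (r : List Int) (f : Nat → Int) :
    ((List.range m).foldl (fun r a => r.set a (f a)) r).length = r.length := by
  induction m with
  | zero => simp
  | succ m ih => rw [List.range_succ, List.foldl_append]; simp [ih]

theorem foldl_set_getElem? (m : Nat) (r : List Int) (f : Nat → Int) :
    ∀ k, ((List.range m).foldl (fun r a => r.set a (f a)) r)[k]? =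
      if k < m ∧ k < r.length then some (f k) else r[k]? := by
  induction m with
  | zero => intro k; simp
  | succ m ih =>
    intro k
    rw [List.range_succ, List.foldl_append]
    simp only [List.foldl_cons, List.foldl_nil]
    rw [List.getElem?_set, ih k, foldl_set_length]
    by_cases hm : m = k
    · subst hm
      by_cases h2 : m < r.length
      · simp [h2]
      · rw [if_pos rfl, if_neg h2,
          if_neg (by omega : ¬(m < m + 1 ∧ m < r.length)),
          List.getElem?_eq_none_iff.mpr (by omega)]
    · rw [if_neg hm]
      by_cases h3 : k < m ∧ k < r.length
      · rw [if_pos h3, if_pos (by omega : k < m + 1 ∧ k < r.length)]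
      · rw [if_neg h3, if_neg (by omega : ¬(k < m + 1 ∧ k < r.length))]

theorem buildRow_eq_rowP (c i : Int) (n : Nat) (below : List Int) (hb : below.length = 26) :
    (List.range 26).foldl (fun r a => r.set a (if c = (a : Int) then i else below[a]!)) (List.replicate 26 (n : Int))
      = rowP c i below := by
  apply List.ext_getElem?
  intro k
  rw [foldl_set_getElem?]
  simp only [List.length_replicate]
  by_cases hk : k < 26
  · have hkb : k < below.length := by omega
    rw [if_pos ⟨hk, hk⟩]
    unfold rowP
    by_cases hcr : 0 ≤ c ∧ c < 26
    · rw [if_pos hcr, List.getElem?_set]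
      by_cases he : c = (k : Int)
      · rw [if_pos he, if_pos (by omega : c.toNat = k), if_pos (by omega : c.toNat < below.length)]
      · rw [if_neg he, if_neg (by omega : ¬ c.toNat = k), List.getElem?_eq_getElem hkb]
        simp [List.getElem!_eq_getElem?_getD, List.getElem?_eq_getElem hkb]
    · rw [if_neg hcr, if_neg (by omega : ¬ c = (k : Int)), List.getElem?_eq_getElem hkb]
      simp [List.getElem!_eq_getElem?_getD, List.getElem?_eq_getElem hkb]
  · rw [if_neg (by omega : ¬(k < 26 ∧ k < 26)),
      List.getElem?_eq_none_iff.mpr (by simp; omega)]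
    unfold rowP
    by_cases hcr : 0 ≤ c ∧ c < 26
    · rw [if_pos hcr]
      exact (List.getElem?_eq_none_iff.mpr (by simp [hb]; omega)).symm
    · rw [if_neg hcr]
      exact (List.getElem?_eq_none_iff.mpr (by omega)).symm

theorem getElem!_set_self (l : List (List Int)) (i : Nat) (x : List Int) (h : i < l.length) :
    (l.set i x)[i]! = x := by
  simp [h]

theorem getElem!_set_succ (l : List (List Int)) (i : Nat) (x : List Int) :
    (l.set i x)[i+1]! = l[i+1]! := by
  rw [List.getElem!_eq_getElem?_getD, List.getElem?_set, if_neg (by omega),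
    ← List.getElem!_eq_getElem?_getD]

theorem innerA_eq (cs : List Char) (i : Nat) (idx : List (List Int)) (hi : i + 1 < idx.length) :
    ∀ m, (List.range m).foldl (fun idx alph =>
        idx.set i ((idx[i]!).set alph
          (if stoi cs[i]! = (alph : Int) then (i : Int) else (idx[i+1]!)[alph]!))) idx
      = idx.set i ((List.range m).foldl
          (fun r a => r.set a (if stoi cs[i]! = (a : Int) then (i : Int) else (idx[i+1]!)[a]!)) (idx[i]!)) := by
  intro m
  have hii : i < idx.length := by omega
  induction m with
  | zero =>
    simp only [List.range_zero, List.foldl_nil]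
    rw [List.getElem!_eq_getElem?_getD, List.getElem?_eq_getElem hii]
    simp
  | succ m ih =>
    rw [List.range_succ]
    simp only [List.foldl_append, List.foldl_cons, List.foldl_nil]
    rw [ih, getElem!_set_self _ _ _ hii, getElem!_set_succ, List.set_set]

theorem outerA (cs : List Char) (n : Nat) (hn : n = cs.length) :
    ∀ k, k ≤ n →
      (List.range' (n-k) k).reverse.foldl (fun idx i =>
        (List.range 26).foldl (fun idx alph =>
          idx.set i ((idx[i]!).set alph
            (if stoi cs[i]! = (alph : Int) then (i : Int) else (idx[i+1]!)[alph]!))) idx)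
        (List.replicate (n + 1) (List.replicate 26 (n : Int)))
      = List.replicate (n - k) (List.replicate 26 (n : Int)) ++ tblRows cs n k := by
  intro k
  induction k with
  | zero =>
    intro _
    simp [tblRows, List.replicate_succ']
  | succ k ih =>
    intro hk
    have hkk : k ≤ n := by omega
    have hstep : List.range' (n - (k+1)) (k+1) = (n - (k+1)) :: List.range' (n - k) k := by
      have h' : (n - (k+1)) + 1 = n - k := by omega
      rw [List.range'_succ, h']
    rw [hstep]
    simp only [List.reverse_cons, List.foldl_append, List.foldl_cons, List.foldl_nil]
    rw [ih hkk]
    set P := List.replicate (n - k) (List.replicate 26 (n : Int)) ++ tblRows cs n k with hP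
    have hPlen : P.length = n + 1 := by
      simp [hP, tblRows_length]
      omega
    have hi1 : (n - (k+1)) + 1 < P.length := by omega
    rw [innerA_eq cs (n - (k+1)) P hi1 26]
    have hne : tblRows cs n k ≠ [] := tblRows_ne_nil cs n k
    have hPi : P[n - (k+1)]! = List.replicate 26 (n : Int) := by
      rw [hP, List.getElem!_eq_getElem?_getD, List.getElem?_append_left (by simp; omega),
        List.getElem?_replicate]
      rw [if_pos (show n - (k+1) < n - k by omega)]
      rfl
    have hPi1 : P[(n - (k+1)) + 1]! = (tblRows cs n k).head! := by
      have he : (n - (k+1)) + 1 = n - k := by omega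
      rw [hP, he, List.getElem!_eq_getElem?_getD, List.getElem?_append_right (by simp)]
      simp only [List.length_replicate, Nat.sub_self]
      rw [← List.head?_eq_getElem?]
      exact (List.head!_eq_head?_getD _).symm
    have hblen : ((tblRows cs n k).head!).length = 26 :=
      tblRows_rows_len cs n k _ (List.head!_mem_self hne)
    rw [hPi, hPi1, buildRow_eq_rowP _ _ _ _ hblen]
    have hsplit : List.replicate (n - k) (List.replicate 26 (n : Int)) =
        List.replicate (n - (k+1)) (List.replicate 26 (n : Int)) ++ [List.replicate 26 (n : Int)] := by
      rw [← List.replicate_succ']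
      congr 1
      omega
    rw [hP, hsplit, List.append_assoc, List.set_append_right _ _ (by simp),
      List.length_replicate, Nat.sub_self]
    simp [tblRows]

-- ===== bridging: both sides equal the reference table =====
theorem rowRec (cs : List Char) (i : Nat) (hi : i < cs.length) :
    rowP (stoi cs[i]!) (i : Int) (refRow cs (i+1)) = refRow cs i := by
  have hlen : (refRow cs (i+1)).length = 26 := by simp [refRow]
  have hentry : ∀ c, c < 26 → entryI cs (Char.ofNat (97 + c)) i =
      if cs[i]! = Char.ofNat (97 + c) then (i : Int) else entryI cs (Char.ofNat (97 + c)) (i+1) := by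
    intro c hc
    unfold entryI
    rw [nxt_drop cs _ i hi]
    split <;> simp
  by_cases hL : 97 ≤ cs[i]!.toNat ∧ cs[i]!.toNat ≤ 122
  · have hc0 : (0 : Int) ≤ stoi cs[i]! ∧ stoi cs[i]! < 26 := by unfold stoi; omega
    unfold rowP
    rw [if_pos hc0]
    apply List.ext_getElem (by simp [refRow])
    intro c hc1 hc2
    have hc : c < 26 := by simpa [refRow] using hc2
    rw [List.getElem_set]
    simp only [refRow, List.getElem_map, List.getElem_range]
    rw [hentry c hc]
    by_cases hq : cs[i]!.toNat = 97 + c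
    · rw [if_pos (show (stoi cs[i]!).toNat = c by unfold stoi; omega),
        if_pos ((charEq _ c hc).mpr hq)]
    · rw [if_neg (show ¬ (stoi cs[i]!).toNat = c by unfold stoi; omega),
        if_neg (fun hcontra => hq ((charEq _ c hc).mp hcontra))]
  · have hc0 : ¬ ((0 : Int) ≤ stoi cs[i]! ∧ stoi cs[i]! < 26) := by unfold stoi; omega
    unfold rowP
    rw [if_neg hc0]
    unfold refRow
    apply List.map_congr_left
    intro c hcmem
    have hc : c < 26 := List.mem_range.mp hcmem
    rw [hentry c hc, if_neg (fun hcontra => hc0 (by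
      have := (charEq _ c hc).mp hcontra
      unfold stoi
      omega))]

theorem tbl_eq (cs : List Char) (n : Nat) (hn : n = cs.length) :
    ∀ k, k ≤ n → tblRows cs n k = (List.range' (n-k) (k+1)).map (fun i => refRow cs i) := by
  intro k
  induction k with
  | zero =>
    intro _
    show [List.replicate 26 (n : Int)] = _
    rw [List.range'_one, List.map_singleton, Nat.sub_zero]
    congr 1
    unfold refRow
    rw [List.range_eq_range']
    exact (map_entry_const _ 0 26 (n : Int) (fun c _ _ => by
      unfold entryI
      rw [hn, List.drop_length]
      rfl)).symm
  | succ k ih =>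
    intro hk
    have hkk : k ≤ n := by omega
    have hstep : List.range' (n - (k+1)) (k+2) = (n - (k+1)) :: List.range' (n - k) (k+1) := by
      have h' : (n - (k+1)) + 1 = n - k := by omega
      rw [List.range'_succ, h']
    rw [hstep, List.map_cons, show tblRows cs n (k+1) =
      rowP (stoi cs[n-(k+1)]!) ((n-(k+1) : Nat) : Int) (tblRows cs n k).head! :: tblRows cs n k from rfl,
      ih hkk]
    have hhead : ((List.range' (n-k) (k+1)).map (fun i => refRow cs i)).head! = refRow cs (n-k) := by
      rw [List.range'_succ, List.map_cons]
      rfl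
    rw [← ih hkk, ih hkk] at hhead ⊢
    rw [hhead]
    congr 1
    rw [show n - k = (n - (k+1)) + 1 by omega]
    exact rowRec cs (n - (k+1)) (by omega)

-- ===== VERDICT (by name: the statement is the Claim_ definition above) =====
theorem right_leftmost_idx_spec : Claim_equal_right_leftmost_idx := by
  intro S _
  unfold Spec_right_leftmost_idx right_leftmost_idx right_leftmost_idx_alt
  set cs := S.toList with hcs
  set n := cs.length with hn
  -- A's fold equals the reference table
  have hA := outerA cs n hn n le_rfl
  rw [Nat.sub_self, ← List.range_eq_range', List.replicate_zero, List.nil_append] at hA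
  have hT := tbl_eq cs n hn n le_rfl
  rw [Nat.sub_self, ← List.range_eq_range'] at hT
  -- B's columns equal the reference columns
  have hcol : ∀ c, c < 26 →
      (cs.zipIdx.foldl (fun (st : List Int × Nat) px =>
          if px.1 = Char.ofNat (97 + c) then (st.1 ++ List.replicate (px.2 - st.2 + 1) ((px.2 : Int)), px.2 + 1)
          else st) (([] : List Int), 0)).1
        ++ List.replicate (n + 1 -
          (cs.zipIdx.foldl (fun (st : List Int × Nat) px =>
            if px.1 = Char.ofNat (97 + c) then (st.1 ++ List.replicate (px.2 - st.2 + 1) ((px.2 : Int)), px.2 + 1)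
            else st) (([] : List Int), 0)).2) (n : Int)
      = (List.range (n + 1)).map (entryI cs (Char.ofNat (97 + c))) := by
    intro c _
    have := bfold cs (Char.ofNat (97 + c)) n 0 (by omega) 0 le_rfl
      (fun t ht1 ht2 => absurd ht2 (by omega))
    simpa using this
  simp only []
  rw [hA, hT]
  apply List.map_congr_left
  intro i hi
  have hilt : i < n + 1 := List.mem_range.mp hi
  rw [List.map_map]
  unfold refRow
  apply List.map_congr_left
  intro c hcmem
  have hc : c < 26 := List.mem_range.mp hcmem
  show entryI cs (Char.ofNat (97 + c)) i = _
  simp only [Function.comp]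
  rw [hcol c hc, List.getElem!_eq_getElem?_getD, List.getElem?_map, List.getElem?_range hilt]
  rfl
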